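-- pv_equiv track=rewrite | github.com/joaomail2005-ship-it/Biomecnica-cornea | Condicoes.py | indices_para_mask
-- ===== SOURCE A (Python) =====
-- def indices_para_mask(indices):
--             """Converte lista de índices de edge no formato de máscara do Abaqus."""
--             if not indices:
--                 return ('[#0 ]',)
--             n_words = (max(indices) // 32) + 1
--             words = [0] * n_words
--             for i in indices:
--                 words[i // 32] |= (1 << (i % 32))
--             mask_str = '[' + ' '.join('#%x' % w for w in words) + ' ]'
--             return (mask_str,)
-- ===== SOURCE B (Python) =====
-- def indices_para_mask(indices):
--     """Converte lista de indices de edge no formato de mascara do Abaqus."""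
--     if not indices:
--         return ('[#0 ]',)
--     big = 0
--     for i in indices:
--         big |= (1 << i)
--     words = []
--     while big:
--         words.append(big & 0xFFFFFFFF)
--         big >>= 32
--     return ('[' + ' '.join('#%x' % w for w in words) + ' ]',)
-- ===== Notes on version B (the rewrite author's own statement) =====
-- stated objective: alternative
-- what changed: Instead of allocating a word array sized by max() and updating words[i//32] in place, B ORs every index into one big Python integer in a single pass and then peels it into 32-bit words low-to-high with shift/mask until it is exhausted.
-- outside the precondition, e.g. on indices_para_mask([-1, 40]): A returns ('[#0 #80000100 ]',), B raises ValueError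
import Mathlib
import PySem

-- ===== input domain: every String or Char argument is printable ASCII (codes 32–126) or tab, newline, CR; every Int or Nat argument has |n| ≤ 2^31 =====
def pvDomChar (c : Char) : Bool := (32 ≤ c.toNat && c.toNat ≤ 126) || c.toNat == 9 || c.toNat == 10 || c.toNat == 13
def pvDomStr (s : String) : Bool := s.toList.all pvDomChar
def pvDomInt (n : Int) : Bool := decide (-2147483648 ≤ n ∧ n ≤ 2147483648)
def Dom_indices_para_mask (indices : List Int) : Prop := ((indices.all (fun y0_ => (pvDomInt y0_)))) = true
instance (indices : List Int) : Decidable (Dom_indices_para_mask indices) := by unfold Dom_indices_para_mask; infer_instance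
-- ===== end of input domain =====

-- B replaces A's allocate-by-max word array updated in place by a single OR-accumulated
-- big integer sliced into 32-bit words (objective: alternative decomposition, not faster).

-- ===== PORT A =====
-- shared helper: Python's '#%x' lowercase hex formatting of a nonnegative word (exact for Nat)
def pvHexChar (d : Nat) : Char := if d < 10 then Char.ofNat (48 + d) else Char.ofNat (87 + d)

def pvHexAux (n : Nat) (acc : List Char) : List Char :=
  if h : n = 0 then acc else pvHexAux (n / 16) (pvHexChar (n % 16) :: acc)
  termination_by n
  decreasing_by exact Nat.div_lt_self (Nat.pos_of_ne_zero h) (by omega)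

def pvNatToHex (n : Nat) : String :=
  if n = 0 then "0" else String.ofList (pvHexAux n [])

-- words hold Python ints that are nonnegative here, modelled as Nat (exact on Pre_);
-- `words[i//32] |= …` is an in-range list update under Pre_ (Python raises IndexError outside it).
def indices_para_mask (indices : List Int) : List String :=
  if indices = [] then ["[#0 ]"]
  else
    let m : Int := (PySem.List.max? indices (fun x => x)).getD 0   -- max(indices); some since nonempty
    let nWords : Int := PySem.Int.floordiv m 32 + 1
    let words0 : List Nat := List.replicate nWords.toNat 0
    let words := indices.foldl (fun ws i =>
      let idx := (PySem.Int.floordiv i 32).toNat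
      ws.set idx (ws.getD idx 0 ||| (1 <<< (PySem.Int.mod i 32).toNat))) words0
    ["[" ++ String.intercalate " " (words.map fun w => "#" ++ pvNatToHex w) ++ " ]"]

-- ===== PORT B =====
-- big = OR of 1 << i is a nonnegative Python int, modelled as Nat (exact on Pre_).
-- Source B's `while big: words.append(big & 0xFFFFFFFF); big >>= 32` loop, with the usual
-- accumulator-and-reverse transcription of a Python append loop.
def pvWordsAux (b : Nat) (acc : List Nat) : List Nat :=
  if h : b = 0 then acc.reverse else pvWordsAux (b >>> 32) ((b &&& 0xFFFFFFFF) :: acc)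
  termination_by b
  decreasing_by
    rw [Nat.shiftRight_eq_div_pow]
    exact Nat.div_lt_self (Nat.pos_of_ne_zero h) (by norm_num)

def indices_para_mask_alt (indices : List Int) : List String :=
  if indices = [] then ["[#0 ]"]
  else
    let big : Nat := indices.foldl (fun b i => b ||| (1 <<< i.toNat)) 0
    let words : List Nat := pvWordsAux big []
    ["[" ++ String.intercalate " " (words.map fun w => "#" ++ pvNatToHex w) ++ " ]"]

-- ===== PRECONDITION & SPEC =====
-- Pre_ excludes lists containing a negative index: edge indices are nonnegative by nature, and
-- there A either raises IndexError or returns a value by accidental negative-index wraparound,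
-- while B raises ValueError (negative shift count).
def Pre_indices_para_mask (indices : List Int) : Prop := ∀ i ∈ indices, 0 ≤ i
instance (indices : List Int) : Decidable (Pre_indices_para_mask indices) := by unfold Pre_indices_para_mask; infer_instance
def pvWitness_indices_para_mask : List Int := [5, 5, 37, 1]

def Spec_indices_para_mask (indices : List Int) (out : List String) : Prop := out = indices_para_mask_alt indices
instance (indices : List Int) (out : List String) : Decidable (Spec_indices_para_mask indices out) := by unfold Spec_indices_para_mask; infer_instance

-- ===== CLAIM (what is proved, stated in full; the proofs are below) =====
def Claim_equal_indices_para_mask : Prop := ∀ (indices : List Int), Dom_indices_para_mask indices → Pre_indices_para_mask indices → Spec_indices_para_mask indices (indices_para_mask indices)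

-- ===== LEMMAS AND PROOFS =====

-- B's accumulated big integer, and its w-th 32-bit word
def pvBig (L : List Int) : Nat := L.foldl (fun b i => b ||| (1 <<< i.toNat)) 0
def pvWord (big w : Nat) : Nat := (big >>> (32 * w)) &&& 0xFFFFFFFF
-- A's loop body
def pvStep (ws : List Nat) (i : Int) : List Nat :=
  let idx := (PySem.Int.floordiv i 32).toNat
  ws.set idx (ws.getD idx 0 ||| (1 <<< (PySem.Int.mod i 32).toNat))

theorem pvMaskBit (k : Nat) : Nat.testBit 4294967295 k = decide (k < 32) := by
  rw [show (4294967295:Nat) = 2^32-1 from rfl, Nat.testBit_two_pow_sub_one]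

theorem pvWord_or (a b w : Nat) : pvWord (a ||| b) w = pvWord a w ||| pvWord b w := by
  unfold pvWord
  apply Nat.eq_of_testBit_eq; intro k
  simp [Nat.testBit_and, Nat.testBit_or, Nat.testBit_shiftRight, Bool.and_or_distrib_right]

theorem pvWord_single (j w : Nat) :
    pvWord (1 <<< j) w = if w = j / 32 then 1 <<< (j % 32) else 0 := by
  unfold pvWord
  rw [Nat.one_shiftLeft]
  apply Nat.eq_of_testBit_eq; intro k
  simp [Nat.testBit_and, Nat.testBit_shiftRight, Nat.testBit_two_pow, pvMaskBit]
  split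
  · rw [Nat.one_shiftLeft]
    simp [Nat.testBit_two_pow]
    rcases Nat.decEq (j % 32) k with h | h
    · simp [h]; omega
    · simp [h]; omega
  · rename_i hne
    simp
    omega

theorem pvWord_zero (w : Nat) : pvWord 0 w = 0 := by
  simp [pvWord]

theorem pvFoldl_or_init (L : List Int) (b : Nat) :
    L.foldl (fun b i => b ||| (1 <<< i.toNat)) b = b ||| pvBig L := by
  induction L generalizing b with
  | nil => simp [pvBig]
  | cons i t ih =>
      simp only [pvBig, List.foldl_cons]
      rw [ih, ih]
      simp [Nat.or_assoc]

theorem pvBig_cons (i : Int) (t : List Int) :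
    pvBig (i :: t) = (1 <<< i.toNat) ||| pvBig t := by
  rw [pvBig, List.foldl_cons, pvFoldl_or_init]
  simp

theorem pvBig_testBit (L : List Int) (k : Nat) :
    (pvBig L).testBit k = L.any (fun i => i.toNat == k) := by
  induction L with
  | nil => simp [pvBig]
  | cons i t ih =>
      rw [pvBig_cons]
      simp only [Nat.testBit_or, ih, Nat.one_shiftLeft, Nat.testBit_two_pow, List.any_cons]
      rw [show (i.toNat == k) = decide (i.toNat = k) from rfl]

theorem pvBig_lt (L : List Int) (M : Nat) (h : ∀ i ∈ L, i.toNat ≤ M) :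
    pvBig L < 2 ^ (M + 1) := by
  apply Nat.lt_pow_two_of_testBit
  intro k hk
  rw [pvBig_testBit]
  simp only [List.any_eq_false]
  intro i hi
  have := h i hi
  simp; omega

theorem pvBig_ge (L : List Int) (M : Nat) (i : Int) (hi : i ∈ L) (hM : i.toNat = M) :
    2 ^ M ≤ pvBig L := by
  apply Nat.ge_two_pow_of_testBit
  rw [pvBig_testBit]
  simp only [List.any_eq_true]
  exact ⟨i, hi, by simp [hM]⟩

theorem pvFloordiv32 (i : Int) (h : 0 ≤ i) :
    PySem.Int.floordiv i 32 = ((i.toNat / 32 : Nat) : Int) := by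
  have : i = ((i.toNat : Nat) : Int) := by omega
  rw [this, show ((32:Int) = ((32:Nat):Int)) from rfl, PySem.Int.floordiv_natCast]
  simp

theorem pvMod32 (i : Int) (h : 0 ≤ i) :
    PySem.Int.mod i 32 = ((i.toNat % 32 : Nat) : Int) := by
  have : i = ((i.toNat : Nat) : Int) := by omega
  rw [this, show ((32:Int) = ((32:Nat):Int)) from rfl, PySem.Int.mod_natCast]
  simp

theorem pvStep_len (ws : List Nat) (i : Int) : (pvStep ws i).length = ws.length := by
  simp [pvStep]

theorem pvFoldA_len (L : List Int) (W : List Nat) :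
    (L.foldl pvStep W).length = W.length := by
  induction L generalizing W with
  | nil => rfl
  | cons i t ih => rw [List.foldl_cons, ih, pvStep_len]

theorem pvFoldA_getD (L : List Int) (W : List Nat)
    (h : ∀ i ∈ L, 0 ≤ i ∧ i.toNat / 32 < W.length) (w : Nat) :
    (L.foldl pvStep W).getD w 0 = W.getD w 0 ||| pvWord (pvBig L) w := by
  induction L generalizing W with
  | nil => simp [pvBig, pvWord_zero]
  | cons i t ih =>
      obtain ⟨hi0, hiW⟩ := h i (by simp)
      rw [List.foldl_cons, ih (pvStep W i)
            (fun j hj => by rw [pvStep_len]; exact h j (by simp [hj])),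
          pvBig_cons, pvWord_or, pvWord_single]
      have hset : (pvStep W i).getD w 0 =
          if w = i.toNat / 32 then W.getD w 0 ||| (1 <<< (i.toNat % 32)) else W.getD w 0 := by
        simp only [pvStep, pvFloordiv32 i hi0, pvMod32 i hi0, Int.toNat_natCast]
        rw [List.getD_eq_getElem?_getD, List.getElem?_set]
        split
        · rename_i heq
          simp [heq]
        · rename_i hne
          rw [if_neg (fun hh => hne hh.symm), List.getD_eq_getElem?_getD]
      rw [hset]
      split
      · simp [Nat.or_assoc]
      · simp

-- proof-side recursive view of B's word-peeling loop
def pvWordsList (b : Nat) : List Nat :=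
  if h : b = 0 then [] else (b &&& 0xFFFFFFFF) :: pvWordsList (b >>> 32)
  termination_by b
  decreasing_by
    rw [Nat.shiftRight_eq_div_pow]
    exact Nat.div_lt_self (Nat.pos_of_ne_zero h) (by norm_num)

theorem pvWordsAux_eq (b : Nat) (acc : List Nat) :
    pvWordsAux b acc = acc.reverse ++ pvWordsList b := by
  induction b using Nat.strong_induction_on generalizing acc with
  | _ b ih =>
    rw [pvWordsAux, pvWordsList]
    by_cases h : b = 0
    · simp [h]
    · have hlt : b >>> 32 < b := by
        rw [Nat.shiftRight_eq_div_pow]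
        exact Nat.div_lt_self (Nat.pos_of_ne_zero h) (by norm_num)
      simp [h, ih _ hlt]

theorem pvWordsList_eq (k : Nat) : ∀ b, 2 ^ (32 * k) ≤ b → b < 2 ^ (32 * (k + 1)) →
    pvWordsList b = (List.range (k + 1)).map (fun w => pvWord b w) := by
  induction k with
  | zero =>
      intro b hge hlt
      rw [pvWordsList]
      have hb : b ≠ 0 := by simp at hge; omega
      have hz : b >>> 32 = 0 := by
        rw [Nat.shiftRight_eq_div_pow]
        simp at hlt ⊢
        omega
      rw [dif_neg hb, hz, pvWordsList]
      simp [pvWord]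
  | succ k ih =>
      intro b hge hlt
      have hb : b ≠ 0 := by
        have : (1:Nat) ≤ 2 ^ (32 * (k+1)) := Nat.one_le_two_pow
        omega
      have hge' : 2 ^ (32 * k) ≤ b >>> 32 := by
        rw [Nat.shiftRight_eq_div_pow]
        apply Nat.le_div_iff_mul_le (by positivity) |>.mpr
        calc 2 ^ (32 * k) * 2 ^ 32 = 2 ^ (32 * (k + 1)) := by ring
          _ ≤ b := hge
      have hlt' : b >>> 32 < 2 ^ (32 * (k + 1)) := by
        rw [Nat.shiftRight_eq_div_pow]
        apply Nat.div_lt_iff_lt_mul (by positivity) |>.mpr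
        calc b < 2 ^ (32 * (k + 2)) := hlt
          _ = 2 ^ (32 * (k + 1)) * 2 ^ 32 := by ring
      rw [pvWordsList, dif_neg hb, ih _ hge' hlt']
      conv_rhs => rw [List.range_succ_eq_map]
      rw [List.map_cons, List.map_map]
      refine List.cons_eq_cons.mpr ⟨by simp [pvWord], ?_⟩
      apply List.map_congr_left
      intro a ha
      simp only [Function.comp_apply, pvWord]
      rw [← Nat.shiftRight_add]
      congr 2
      omega

theorem pv_main (indices : List Int) (hpre : ∀ i ∈ indices, 0 ≤ i) :
    indices_para_mask indices = indices_para_mask_alt indices := by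
  by_cases hne : indices = []
  · simp [indices_para_mask, indices_para_mask_alt, hne]
  · obtain ⟨m, hm⟩ : ∃ m, PySem.List.max? indices (fun x => x) = some m := by
      cases h : PySem.List.max? indices (fun x => x) with
      | none => exact absurd ((PySem.List.max?_eq_none_iff _ _).mp h) hne
      | some m => exact ⟨m, rfl⟩
    have hmem : m ∈ indices := PySem.List.max?_mem hm
    have hmax : ∀ y ∈ indices, y ≤ m := PySem.List.max?_isMax hm
    have hm0 : 0 ≤ m := hpre m hmem
    set M := m.toNat with hM
    have htoNle : ∀ i ∈ indices, i.toNat ≤ M := fun i hi => by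
      have := hmax i hi; omega
    have hge : 2 ^ M ≤ pvBig indices := pvBig_ge indices M m hmem rfl
    have hlt : pvBig indices < 2 ^ (M + 1) := pvBig_lt indices M htoNle
    have hwords : pvWordsAux (pvBig indices) [] =
        (List.range (M / 32 + 1)).map (fun w => pvWord (pvBig indices) w) := by
      rw [pvWordsAux_eq, List.reverse_nil, List.nil_append]
      apply pvWordsList_eq
      · calc 2 ^ (32 * (M / 32)) ≤ 2 ^ M := Nat.pow_le_pow_right (by omega) (by omega)
          _ ≤ pvBig indices := hge
      · calc pvBig indices < 2 ^ (M + 1) := hlt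
          _ ≤ 2 ^ (32 * (M / 32 + 1)) := Nat.pow_le_pow_right (by omega) (by omega)
    rw [indices_para_mask, indices_para_mask_alt, if_neg hne, if_neg hne]
    simp only [hm, Option.getD_some]
    congr 2
    congr 1
    congr 1
    have hnA : (PySem.Int.floordiv m 32 + 1).toNat = M / 32 + 1 := by
      rw [pvFloordiv32 m hm0]; omega
    show (indices.foldl pvStep (List.replicate (PySem.Int.floordiv m 32 + 1).toNat 0)).map
          (fun w => "#" ++ pvNatToHex w)
        = (pvWordsAux (pvBig indices) []).map (fun w => "#" ++ pvNatToHex w)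
    rw [hwords]
    congr 1
    rw [hnA]
    have hlen0 : (List.replicate (M / 32 + 1) (0:Nat)).length = M / 32 + 1 := by simp
    have hpre' : ∀ i ∈ indices, 0 ≤ i ∧ i.toNat / 32 < (List.replicate (M / 32 + 1) (0:Nat)).length := by
      intro i hi
      refine ⟨hpre i hi, ?_⟩
      rw [hlen0]
      have := htoNle i hi
      have := Nat.div_le_div_right (c := 32) this
      omega
    apply List.ext_getElem
    · rw [pvFoldA_len, hlen0, List.length_map, List.length_range]
    · intro w h1 h2
      have hwlt : w < M / 32 + 1 := by simpa [pvFoldA_len, hlen0] using h1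
      have := pvFoldA_getD indices (List.replicate (M / 32 + 1) 0) hpre' w
      rw [List.getD_eq_getElem?_getD, List.getElem?_eq_getElem h1] at this
      simp only [Option.getD_some] at this
      rw [this]
      simp [pvWord]

-- ===== VERDICT (by name: the statement is the Claim_ definition above) =====
theorem indices_para_mask_spec : Claim_equal_indices_para_mask := by
  intro indices _ hpre
  unfold Spec_indices_para_mask
  exact pv_main indices hpre
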